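-- pv_equiv track=rewrite | github.com/Rafav/Rafav.github.io | gongora/v7/fourgram_rima.py | construir_sa_corpus
-- ===== SOURCE A (Python) =====
-- TILDE_MAP = str.maketrans(
--     'áéíóúüÁÉÍÓÚÜ',
--     'aeiouuAEIOUU'
-- )
--
-- def normaliza(word: str) -> str:
--     """Minúsculas, elimina diacríticos excepto ü/diéresis de cómputo."""
--     w = word.strip().lower()
--     # Preservamos la posición de la diéresis (cuenta sílaba) antes de quitar tildes
--     w = w.translate(TILDE_MAP)
--     return w
--
-- def fourgram(word: str) -> str:
--     """4-grama sobre la cadena invertida: captura sílaba tónica sin morfema."""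
--     n = normaliza(word)
--     if len(n) < 4:
--         return n[::-1].ljust(4, '_')   # padding para palabras cortas
--     return n[::-1][:4]
--
-- def construir_sa_corpus(sonetos: dict, corpus_target: str):
--     """
--     Concatena los 4-gramas de todos los sonetos del corpus en una sola cadena
--     de tokens separados por '$' (centinela). Devuelve:
--       - tokens: list[str]
--       - sa: list[int]  (índices ordenados lexicográficamente)
--       - origen: list[tuple]  (corpus, soneto_n, verso_n) para cada token
--     """
--     tokens = []
--     origen = []
--     for (corpus, soneto_n), versos in sorted(sonetos.items()):
--         if corpus != corpus_target:
--             continue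
--         for verso_n, estrofa, palabra in sorted(versos):
--             fg = fourgram(palabra)
--             tokens.append(fg)
--             origen.append((corpus, soneto_n, verso_n, estrofa, palabra, fg))
--         tokens.append('$')
--         origen.append((corpus, soneto_n, -1, '', '$', '$'))
--
--     # SA: índices que ordenan todos los sufijos de la lista de tokens
--     sa = sorted(range(len(tokens)), key=lambda i: tokens[i:])
--     return tokens, sa, origen
-- ===== SOURCE B (Python) =====
-- TILDE_MAP = str.maketrans(
--     'áéíóúüÁÉÍÓÚÜ',
--     'aeiouuAEIOUU'
-- )
--
-- def normaliza(word: str) -> str: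
--     w = word.strip().lower()
--     w = w.translate(TILDE_MAP)
--     return w
--
-- def fourgram(word: str) -> str:
--     n = normaliza(word)
--     if len(n) < 4:
--         return n[::-1].ljust(4, '_')
--     return n[::-1][:4]
--
-- def _suffix_less(tokens, i, j):
--     """suffix tokens[i:] < tokens[j:], compared in place with two cursors."""
--     n = len(tokens)
--     while i < n and j < n:
--         if tokens[i] != tokens[j]:
--             return tokens[i] < tokens[j]
--         i += 1
--         j += 1
--     return i > j   # the shorter suffix (larger start) is the smaller one
--
-- def construir_sa_corpus(sonetos: dict, corpus_target: str):
--     # single origen accumulator; tokens are a projection of it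
--     origen = []
--     for (corpus, soneto_n), versos in sorted(sonetos.items()):
--         if corpus == corpus_target:
--             origen.extend([(corpus, soneto_n, v, e, p, fourgram(p))
--                            for v, e, p in sorted(versos)]
--                           + [(corpus, soneto_n, -1, '', '$', '$')])
--     tokens = [o[5] for o in origen]
--     # suffix array built back-to-front by ordered insertion (no suffix slices)
--     sa = []
--     for i in range(len(tokens) - 1, -1, -1):
--         pos = 0
--         while pos < len(sa) and _suffix_less(tokens, sa[pos], i):
--             pos += 1
--         sa.insert(pos, i)
--     return tokens, sa, origen
-- ===== Notes on version B (the rewrite author's own statement) =====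
-- stated objective: alternative
-- what changed: B builds origen as a single accumulator (tokens becoming a projection of it) and constructs the suffix array back-to-front by ordered insertion with an in-place two-cursor suffix comparison, instead of A's two parallel accumulators and key-sort over materialized suffix slices.
import Mathlib
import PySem

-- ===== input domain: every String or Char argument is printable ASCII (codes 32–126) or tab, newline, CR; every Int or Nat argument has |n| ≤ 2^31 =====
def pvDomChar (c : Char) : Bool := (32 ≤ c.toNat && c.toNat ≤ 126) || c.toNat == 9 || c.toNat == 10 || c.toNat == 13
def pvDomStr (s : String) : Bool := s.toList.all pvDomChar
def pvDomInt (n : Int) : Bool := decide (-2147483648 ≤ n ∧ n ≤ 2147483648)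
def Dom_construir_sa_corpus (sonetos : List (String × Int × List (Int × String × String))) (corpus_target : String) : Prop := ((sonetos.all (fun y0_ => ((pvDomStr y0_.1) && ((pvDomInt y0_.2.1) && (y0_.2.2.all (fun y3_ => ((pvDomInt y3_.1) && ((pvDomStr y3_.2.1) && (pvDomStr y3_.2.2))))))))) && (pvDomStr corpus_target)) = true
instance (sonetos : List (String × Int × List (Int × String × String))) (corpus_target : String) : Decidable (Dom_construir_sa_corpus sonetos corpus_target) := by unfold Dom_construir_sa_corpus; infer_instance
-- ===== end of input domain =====

-- B replaces A's "sort index range by materialized suffix slices" with a back-to-front ordered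
-- insertion using an in-place two-cursor suffix comparison, and builds tokens as a projection of
-- origen instead of a second parallel accumulator (objective: alternative algorithm, same results).

-- ===== PORT A =====
-- shared module helpers (same-module context of A, also used by B's source):
-- str.translate(TILDE_MAP), character by character (exact: TILDE_MAP maps exactly these 12 chars)
def pvTilde (c : Char) : Char :=
  if c = 'á' then 'a' else if c = 'é' then 'e' else if c = 'í' then 'i'
  else if c = 'ó' then 'o' else if c = 'ú' then 'u' else if c = 'ü' then 'u'
  else if c = 'Á' then 'A' else if c = 'É' then 'E' else if c = 'Í' then 'I'
  else if c = 'Ó' then 'O' else if c = 'Ú' then 'U' else if c = 'Ü' then 'U' else c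

-- normaliza: w.strip().lower().translate(TILDE_MAP)
def pvNormaliza (w : String) : List Char :=
  (PySem.Chars.lower (PySem.Chars.strip w.toList)).map pvTilde

-- fourgram: n[::-1] is reverse (= PySem slice? [::-1]); .ljust(4,'_') pads on the right; [:4] is take 4
def pvFourgram (w : String) : String :=
  let n := pvNormaliza w
  if n.length < 4 then String.ofList (n.reverse ++ List.replicate (4 - n.length) '_')
  else String.ofList (n.reverse.take 4)

-- the Python argument is a dict {(corpus, soneto_n): versos}; decode the association list into it
def pvDecode (sonetos : List (String × Int × List (Int × String × String))) :
    PySem.Dict (String × Int) (List (Int × String × String)) :=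
  PySem.Dict.ofList (sonetos.map (fun s => ((s.1, s.2.1), s.2.2)))

-- sorted(sonetos.items()) / sorted(versos): Python tuple comparison is lexicographic = toLex;
-- dict keys are distinct, so the versos component of an item key is never compared
def pvItems (sonetos : List (String × Int × List (Int × String × String))) :
    List ((String × Int) × List (Int × String × String)) :=
  PySem.List.sorted (pvDecode sonetos).items (fun p => toLex p.1) false

def pvSortVersos (vs : List (Int × String × String)) : List (Int × String × String) :=
  PySem.List.sorted vs (fun v => toLex (v.1, toLex (v.2.1, v.2.2))) false

def construir_sa_corpus (sonetos : List (String × Int × List (Int × String × String))) (corpus_target : String) : List String × List Int × (List (String × Int × Int × String × String × String)) :=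
  let tp :=
    (pvItems sonetos).foldl
      (fun (acc : List String × List (String × Int × Int × String × String × String)) it =>
        if it.1.1 ≠ corpus_target then acc
        else
          let acc2 := (pvSortVersos it.2).foldl
            (fun a v =>
              let fg := pvFourgram v.2.2
              (a.1 ++ [fg], a.2 ++ [(it.1.1, it.1.2, v.1, v.2.1, v.2.2, fg)])) acc
          (acc2.1 ++ ["$"], acc2.2 ++ [(it.1.1, it.1.2, -1, "", "$", "$")]))
      ([], [])
  let tokens := tp.1
  let sa := PySem.List.sorted (PySem.List.pyRange 0 (PySem.List.len tokens) 1)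
      (fun i => PySem.List.slice tokens (some i) none) false
  (tokens, sa, tp.2)

-- ===== PORT B =====
-- _suffix_less: while loop over the two cursors (i increases towards len while it runs)
def pvSuffixLess (tokens : List String) (i j : Int) : Bool :=
  if h : i < PySem.List.len tokens ∧ j < PySem.List.len tokens then
    if PySem.List.pyGetD tokens i "" ≠ PySem.List.pyGetD tokens j "" then
      decide (PySem.List.pyGetD tokens i "" < PySem.List.pyGetD tokens j "")
    else pvSuffixLess tokens (i + 1) (j + 1)
  else decide (i > j)
termination_by (PySem.List.len tokens - i).toNat
decreasing_by simp only [PySem.List.len_eq] at *; omega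

-- the 'pos' scan + sa.insert(pos, i) of B, as the obvious structural recursion on sa
def pvInsert (tokens : List String) (i : Int) : List Int → List Int
  | [] => [i]
  | j :: rest => if pvSuffixLess tokens j i then j :: pvInsert tokens i rest else i :: j :: rest

def construir_sa_corpus_alt (sonetos : List (String × Int × List (Int × String × String))) (corpus_target : String) : List String × List Int × (List (String × Int × Int × String × String × String)) :=
  let origen :=
    (pvItems sonetos).foldl
      (fun acc it =>
        if it.1.1 = corpus_target then
          acc ++ ((pvSortVersos it.2).map
                    (fun v => (it.1.1, it.1.2, v.1, v.2.1, v.2.2, pvFourgram v.2.2))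
                  ++ [(it.1.1, it.1.2, -1, "", "$", "$")])
        else acc) []
  let tokens := origen.map (fun o => o.2.2.2.2.2)
  let sa := (PySem.List.pyRange (PySem.List.len tokens - 1) (-1) (-1)).foldl
      (fun s i => pvInsert tokens i s) []
  (tokens, sa, origen)

-- ===== PRECONDITION & SPEC =====
def Spec_construir_sa_corpus (sonetos : List (String × Int × List (Int × String × String))) (corpus_target : String) (out : List String × List Int × (List (String × Int × Int × String × String × String))) : Prop := out = construir_sa_corpus_alt sonetos corpus_target
instance (sonetos : List (String × Int × List (Int × String × String))) (corpus_target : String) (out : List String × List Int × (List (String × Int × Int × String × String × String))) : Decidable (Spec_construir_sa_corpus sonetos corpus_target out) := by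
  unfold Spec_construir_sa_corpus
  haveI d1 : DecidableEq (String × Int × Int × String × String × String) := inferInstance
  haveI d2 : DecidableEq (List (String × Int × Int × String × String × String)) := instDecidableEqList
  infer_instance

-- ===== CLAIM (what is proved, stated in full; the proofs are below) =====
def Claim_equal_construir_sa_corpus : Prop := ∀ (sonetos : List (String × Int × List (Int × String × String))) (corpus_target : String), Dom_construir_sa_corpus sonetos corpus_target → Spec_construir_sa_corpus sonetos corpus_target (construir_sa_corpus sonetos corpus_target)

-- ===== LEMMAS AND PROOFS =====

-- the per-item block B appends for a matching item
def pvBlock (t : String) (it : (String × Int) × List (Int × String × String)) :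
    List (String × Int × Int × String × String × String) :=
  if it.1.1 = t then
    (pvSortVersos it.2).map (fun v => (it.1.1, it.1.2, v.1, v.2.1, v.2.2, pvFourgram v.2.2))
      ++ [(it.1.1, it.1.2, -1, "", "$", "$")]
  else []

-- A's paired accumulator over one items list is (map of B's origen, B's origen)
theorem pvFoldA_eq (t : String) (items : List ((String × Int) × List (Int × String × String)))
    (ts : List String) (os : List (String × Int × Int × String × String × String)) :
    items.foldl
      (fun (acc : List String × List (String × Int × Int × String × String × String)) it =>
        if it.1.1 ≠ t then acc
        else
          let acc2 := (pvSortVersos it.2).foldl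
            (fun a v =>
              let fg := pvFourgram v.2.2
              (a.1 ++ [fg], a.2 ++ [(it.1.1, it.1.2, v.1, v.2.1, v.2.2, fg)])) acc
          (acc2.1 ++ ["$"], acc2.2 ++ [(it.1.1, it.1.2, -1, "", "$", "$")]))
      (ts, os)
    = (ts ++ (items.flatMap (pvBlock t)).map (fun o => o.2.2.2.2.2),
       os ++ items.flatMap (pvBlock t)) := by
  induction items generalizing ts os with
  | nil => simp
  | cons it rest ih =>
    simp only [List.foldl_cons, List.flatMap_cons]
    by_cases h : it.1.1 = t
    · rw [if_neg (not_not_intro h)]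
      rw [PySem.List.foldl_prod_mk
            (f := fun (a : List String) (v : Int × String × String) => a ++ [pvFourgram v.2.2])
            (g := fun (a : List (String × Int × Int × String × String × String))
                    (v : Int × String × String) =>
                  a ++ [(it.1.1, it.1.2, v.1, v.2.1, v.2.2, pvFourgram v.2.2)])]
      rw [PySem.List.foldl_append_singleton_eq_map, PySem.List.foldl_append_singleton_eq_map, ih]
      unfold pvBlock
      rw [if_pos h]
      simp [Function.comp_def]
    · rw [if_pos h, ih]
      unfold pvBlock
      rw [if_neg h]
      simp

-- B's origen fold is the flatMap of the blocks
theorem pvFoldB_eq (t : String) (items : List ((String × Int) × List (Int × String × String)))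
    (os : List (String × Int × Int × String × String × String)) :
    items.foldl
      (fun acc it =>
        if it.1.1 = t then
          acc ++ ((pvSortVersos it.2).map
                    (fun v => (it.1.1, it.1.2, v.1, v.2.1, v.2.2, pvFourgram v.2.2))
                  ++ [(it.1.1, it.1.2, -1, "", "$", "$")])
        else acc) os
    = os ++ items.flatMap (pvBlock t) := by
  have hstep : ∀ (acc : List (String × Int × Int × String × String × String)), ∀ x ∈ items,
      (if x.1.1 = t then
          acc ++ ((pvSortVersos x.2).map
                    (fun v => (x.1.1, x.1.2, v.1, v.2.1, v.2.2, pvFourgram v.2.2))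
                  ++ [(x.1.1, x.1.2, -1, "", "$", "$")])
        else acc) = acc ++ pvBlock t x := by
    intro acc x _
    by_cases h : x.1.1 = t <;> simp [pvBlock, h]
  rw [PySem.List.foldl_congr_mem items _ (fun acc it => acc ++ pvBlock t it) os hstep,
      PySem.List.foldl_append_eq_flatMap]

-- pvSuffixLess decides the lexicographic order of the two suffixes
theorem pvSuffixLess_iff (tokens : List String) (i j : Int)
    (hi0 : 0 ≤ i) (hj0 : 0 ≤ j) (hne : i ≠ j)
    (hin : i ≤ tokens.length) (hjn : j ≤ tokens.length) :
    pvSuffixLess tokens i j = true ↔ tokens.drop i.toNat < tokens.drop j.toNat := by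
  induction i, j using pvSuffixLess.induct tokens with
  | case1 i j h hneq =>
    rw [pvSuffixLess]
    simp only [PySem.List.len_eq] at h ⊢
    rw [dif_pos h, if_pos hneq]
    have hi : i.toNat < tokens.length := by omega
    have hj : j.toNat < tokens.length := by omega
    rw [List.drop_eq_getElem_cons hi, List.drop_eq_getElem_cons hj]
    rw [PySem.List.pyGetD_eq_getElem tokens "" hi0 (by exact_mod_cast h.1),
        PySem.List.pyGetD_eq_getElem tokens "" hj0 (by exact_mod_cast h.2)] at hneq ⊢
    rw [List.cons_lt_cons_iff]
    simp [hneq]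
  | case2 i j h hneq ih =>
    rw [pvSuffixLess]
    simp only [PySem.List.len_eq] at h ⊢
    rw [dif_pos h, if_neg hneq]
    have hi : i.toNat < tokens.length := by omega
    have hj : j.toNat < tokens.length := by omega
    rw [PySem.List.pyGetD_eq_getElem tokens "" hi0 (by exact_mod_cast h.1),
        PySem.List.pyGetD_eq_getElem tokens "" hj0 (by exact_mod_cast h.2)] at hneq
    rw [not_not] at hneq
    rw [ih (by omega) (by omega) (by omega) (by omega) (by omega)]
    rw [List.drop_eq_getElem_cons hi, List.drop_eq_getElem_cons hj,
        List.cons_lt_cons_iff]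
    have h1 : (i + 1).toNat = i.toNat + 1 := by omega
    have h2 : (j + 1).toNat = j.toNat + 1 := by omega
    rw [h1, h2]
    simp [hneq]
  | case3 i j h =>
    rw [pvSuffixLess]
    simp only [PySem.List.len_eq] at h ⊢
    rw [dif_neg h]
    by_cases hi : (tokens.length : Int) ≤ i
    · have hj : j < (tokens.length : Int) := by omega
      have hdi : tokens.drop i.toNat = [] := List.drop_eq_nil_of_le (by omega)
      have hdj : tokens.drop j.toNat ≠ [] := by
        simp [List.drop_eq_nil_iff]; omega
      rw [hdi]
      rcases List.exists_cons_of_ne_nil hdj with ⟨a, l, hl⟩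
      rw [hl]
      simp only [decide_eq_true_eq]
      constructor
      · intro _; exact List.nil_lt_cons a l
      · intro _; omega
    · have hj : (tokens.length : Int) ≤ j := by
        by_contra hc; exact h ⟨by omega, by omega⟩
      have hdj : tokens.drop j.toNat = [] := List.drop_eq_nil_of_le (by omega)
      rw [hdj]
      simp only [decide_eq_true_eq]
      constructor
      · intro hij; omega
      · intro hlt; exact absurd hlt (List.not_lt_nil _)

-- distinct in-range starts give distinct suffixes (their lengths differ)
theorem pvDrop_ne (tokens : List String) (i j : Int)
    (hi0 : 0 ≤ i) (hj0 : 0 ≤ j) (hne : i ≠ j)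
    (_hin : i < tokens.length) (hjn : j < tokens.length) :
    tokens.drop i.toNat ≠ tokens.drop j.toNat := by
  intro h
  have := congrArg List.length h
  simp only [List.length_drop] at this
  omega

theorem pvInsert_perm (tokens : List String) (i : Int) (sa : List Int) :
    (pvInsert tokens i sa).Perm (i :: sa) := by
  induction sa with
  | nil => exact List.Perm.refl _
  | cons j rest ih =>
    rw [pvInsert]
    split_ifs
    · exact (ih.cons j).trans (List.Perm.swap i j rest)
    · exact List.Perm.refl _

theorem pvInsert_pairwise (tokens : List String) (i : Int) (sa : List Int)
    (hb : ∀ x ∈ sa, 0 ≤ x ∧ x < (tokens.length : Int) ∧ x ≠ i)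
    (hi : 0 ≤ i ∧ i < (tokens.length : Int))
    (hp : sa.Pairwise (fun a b => tokens.drop a.toNat < tokens.drop b.toNat)) :
    (pvInsert tokens i sa).Pairwise (fun a b => tokens.drop a.toNat < tokens.drop b.toNat) := by
  induction sa with
  | nil => simp [pvInsert]
  | cons j rest ih =>
    rcases List.pairwise_cons.mp hp with ⟨hj, hrest⟩
    rcases hb j (by simp) with ⟨hj0, hjn, hjne⟩
    rw [pvInsert]
    split_ifs with hsl
    · have hji : tokens.drop j.toNat < tokens.drop i.toNat :=
        (pvSuffixLess_iff tokens j i hj0 hi.1 hjne (by omega) (by omega)).mp hsl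
      refine List.pairwise_cons.mpr ⟨?_, ih (fun x hx => hb x (by simp [hx])) hrest⟩
      intro x hx
      rcases List.mem_cons.mp (((pvInsert_perm tokens i rest).mem_iff).mp hx) with hxi | hxr
      · subst hxi; exact hji
      · exact hj x hxr
    · have hij : tokens.drop i.toNat < tokens.drop j.toNat := by
        have hle : ¬ tokens.drop j.toNat < tokens.drop i.toNat :=
          fun hlt => hsl ((pvSuffixLess_iff tokens j i hj0 hi.1 hjne (by omega) (by omega)).mpr hlt)
        have hne' : tokens.drop i.toNat ≠ tokens.drop j.toNat :=
          pvDrop_ne tokens i j hi.1 hj0 (fun he => hjne he.symm) (by omega) (by omega)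
        exact lt_of_le_of_ne (not_lt.mp hle) hne'
      refine List.pairwise_cons.mpr ⟨?_, hp⟩
      intro x hx
      rcases List.mem_cons.mp hx with hxj | hxr
      · subst hxj; exact hij
      · exact lt_trans hij (hj x hxr)

theorem pvFold_sa (tokens : List String) (l : List Int) (acc : List Int)
    (hnd : l.Nodup)
    (hbl : ∀ x ∈ l, 0 ≤ x ∧ x < (tokens.length : Int))
    (hdisj : ∀ x ∈ l, x ∉ acc)
    (hba : ∀ x ∈ acc, 0 ≤ x ∧ x < (tokens.length : Int))
    (hp : acc.Pairwise (fun a b => tokens.drop a.toNat < tokens.drop b.toNat)) :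
    (l.foldl (fun s i => pvInsert tokens i s) acc).Perm (l ++ acc) ∧
      (l.foldl (fun s i => pvInsert tokens i s) acc).Pairwise
        (fun a b => tokens.drop a.toNat < tokens.drop b.toNat) := by
  induction l generalizing acc with
  | nil => exact ⟨by simp, hp⟩
  | cons i l ih =>
    rw [List.foldl_cons]
    rcases List.nodup_cons.mp hnd with ⟨hil, hlnd⟩
    have hiacc : i ∉ acc := hdisj i (by simp)
    have hperm' : (pvInsert tokens i acc).Perm (i :: acc) := pvInsert_perm tokens i acc
    have hres := ih (pvInsert tokens i acc) hlnd
      (fun x hx => hbl x (by simp [hx]))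
      (fun x hx hmem => by
        rcases List.mem_cons.mp (hperm'.mem_iff.mp hmem) with hxi | hxa
        · exact hil (hxi ▸ hx)
        · exact hdisj x (by simp [hx]) hxa)
      (fun x hx => by
        rcases List.mem_cons.mp (hperm'.mem_iff.mp hx) with hxi | hxa
        · subst hxi; exact hbl x (by simp)
        · exact hba x hxa)
      (pvInsert_pairwise tokens i acc
        (fun x hx => ⟨(hba x hx).1, (hba x hx).2, fun he => hiacc (he ▸ hx)⟩)
        (hbl i (by simp)) hp)
    exact ⟨hres.1.trans ((List.Perm.append_left l hperm').trans List.perm_middle), hres.2⟩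

-- A's suffix-slice sort equals B's insertion-built list
theorem pvSa_eq (tokens : List String) :
    PySem.List.sorted (PySem.List.pyRange 0 (PySem.List.len tokens) 1)
        (fun i => PySem.List.slice tokens (some i) none) false
      = (PySem.List.pyRange (PySem.List.len tokens - 1) (-1) (-1)).foldl
          (fun s i => pvInsert tokens i s) [] := by
  have hrev : PySem.List.pyRange (PySem.List.len tokens - 1) (-1) (-1)
      = (PySem.List.pyRange 0 (PySem.List.len tokens) 1).reverse := by
    rw [PySem.List.pyRange_neg_one_eq_reverse]
    norm_num
  have hmem : ∀ x ∈ PySem.List.pyRange (PySem.List.len tokens - 1) (-1) (-1),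
      0 ≤ x ∧ x < (tokens.length : Int) := by
    intro x hx
    rw [PySem.List.mem_pyRange_neg_one] at hx
    simp only [PySem.List.len_eq] at hx
    omega
  have hnd : (PySem.List.pyRange (PySem.List.len tokens - 1) (-1) (-1)).Nodup := by
    rw [hrev]
    exact List.nodup_reverse.mpr (PySem.List.nodup_pyRange_one _ _)
  obtain ⟨hperm, hpair⟩ := pvFold_sa tokens _ [] hnd hmem (by simp) (by simp) (by simp)
  have h1 : ((PySem.List.pyRange (PySem.List.len tokens - 1) (-1) (-1)).foldl
      (fun s i => pvInsert tokens i s) []).Perm (PySem.List.pyRange 0 (PySem.List.len tokens) 1) := by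
    refine hperm.trans ?_
    rw [List.append_nil, hrev]
    exact List.reverse_perm _
  have hmemres : ∀ x ∈ (PySem.List.pyRange (PySem.List.len tokens - 1) (-1) (-1)).foldl
      (fun s i => pvInsert tokens i s) [], 0 ≤ x := by
    intro x hx
    have := hperm.mem_iff.mp hx
    rw [List.append_nil] at this
    exact (hmem x this).1
  have h2 : ((PySem.List.pyRange (PySem.List.len tokens - 1) (-1) (-1)).foldl
      (fun s i => pvInsert tokens i s) []).Pairwise
      (fun a b => PySem.List.slice tokens (some a) none < PySem.List.slice tokens (some b) none) := by
    refine hpair.imp_of_mem ?_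
    intro a b ha hb hab
    rw [PySem.List.slice_from _ (hmemres a ha), PySem.List.slice_from _ (hmemres b hb)]
    exact hab
  have hsorted : @PySem.List.sorted ℤ (List String) List.instLT (fun a b => a.decidableLT b)
      = @PySem.List.sorted ℤ (List String) List.instLinearOrder.toLT LinearOrder.toDecidableLT := by
    congr 1
    funext a b
    exact Subsingleton.elim _ _
  rw [hsorted]
  exact PySem.List.sorted_eq_of_perm_of_pairwise_lt _ _ _ h1 h2

-- ===== VERDICT (by name: the statement is the Claim_ definition above) =====
theorem construir_sa_corpus_spec : Claim_equal_construir_sa_corpus := by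
  intro sonetos corpus_target _
  unfold Spec_construir_sa_corpus construir_sa_corpus construir_sa_corpus_alt
  rw [pvFoldA_eq, pvFoldB_eq]
  simp only [List.nil_append]
  rw [pvSa_eq]
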